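-- pv_equiv track=rewrite | github.com/jacobwarren/social-media-ai-engineering-etl | 17-writing-style.py | determine_profanity_category
-- ===== SOURCE A (Python) =====
-- def determine_profanity_category(text):
--     categorized_words = {
--         "apeshit": "moderate",
--         "arsehole": "light",
--         "ass": "light",
--         "asshole": "light",
--         "bastard": "moderate",
--         "bullshit": "moderate",
--         "bitch": "moderate",
--         "clusterfuck": "heavy",
--         "damn": "moderate",
--         "damnit": "moderate",
--         "fuck": "heavy",
--         "fucker": "heavy",
--         "fuckin": "heavy",
--         "fucking": "heavy",
--         "goddamn": "heavy",
--         "bollocks": "light",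
--         "hell": "light",
--         "holy shit": "moderate",
--         "horseshit": "moderate",
--         "motherfucker": "heavy",
--         "mother fucker": "heavy",
--         "piss": "light",
--         "pissed": "light",
--         "shit": "moderate",
--     }
--     words_in_text = text.lower().split()
--     highest_severity = "none"
--     severity_mapping = {"none": 0, "light": 1, "moderate": 2, "heavy": 3}
--
--     # Check first 1000 words for performance
--     for word in words_in_text[:1000]:
--         category = categorized_words.get(word, "none")
--         if severity_mapping[category] > severity_mapping[highest_severity]:
--             highest_severity = category
--     return highest_severity
-- ===== SOURCE B (Python) =====
-- def determine_profanity_category(text):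
--     categorized_words = {
--         "apeshit": "moderate",
--         "arsehole": "light",
--         "ass": "light",
--         "asshole": "light",
--         "bastard": "moderate",
--         "bullshit": "moderate",
--         "bitch": "moderate",
--         "clusterfuck": "heavy",
--         "damn": "moderate",
--         "damnit": "moderate",
--         "fuck": "heavy",
--         "fucker": "heavy",
--         "fuckin": "heavy",
--         "fucking": "heavy",
--         "goddamn": "heavy",
--         "bollocks": "light",
--         "hell": "light",
--         "holy shit": "moderate",
--         "horseshit": "moderate",
--         "motherfucker": "heavy",
--         "mother fucker": "heavy",
--         "piss": "light",
--         "pissed": "light",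
--         "shit": "moderate",
--     }
--     words = text.lower().split()[:1000]
--     # resolve by priority: one pass per severity, highest first, early return
--     for category in ("heavy", "moderate", "light"):
--         if any(categorized_words.get(w) == category for w in words):
--             return category
--     return "none"
-- ===== Notes on version B (the rewrite author's own statement) =====
-- stated objective: simpler
-- what changed: B replaces A's running numeric-severity maximum (a severity dict plus a mutable 'highest' state updated per word) with a priority-ordered loop over the three severity categories, returning the first one any word matches; no severity_mapping and no accumulator.
import Mathlib
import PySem

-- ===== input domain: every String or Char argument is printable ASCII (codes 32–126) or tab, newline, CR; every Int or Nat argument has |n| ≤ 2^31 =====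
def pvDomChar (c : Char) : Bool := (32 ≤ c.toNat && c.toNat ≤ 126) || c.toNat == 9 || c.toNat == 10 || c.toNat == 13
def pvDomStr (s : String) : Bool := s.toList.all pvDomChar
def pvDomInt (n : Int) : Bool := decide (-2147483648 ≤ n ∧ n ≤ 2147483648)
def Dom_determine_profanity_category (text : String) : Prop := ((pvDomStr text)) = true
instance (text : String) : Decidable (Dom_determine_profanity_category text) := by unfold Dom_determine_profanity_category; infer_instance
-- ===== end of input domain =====

-- B resolves the severity by priority order (heavy, moderate, light) instead of A's running numeric maximum; same result, simpler.

-- the profanity dictionary, shared verbatim by both programs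
def pvCatWords : PySem.Dict String String := PySem.Dict.ofList [
  ("apeshit", "moderate"), ("arsehole", "light"), ("ass", "light"), ("asshole", "light"),
  ("bastard", "moderate"), ("bullshit", "moderate"), ("bitch", "moderate"),
  ("clusterfuck", "heavy"), ("damn", "moderate"), ("damnit", "moderate"),
  ("fuck", "heavy"), ("fucker", "heavy"), ("fuckin", "heavy"), ("fucking", "heavy"),
  ("goddamn", "heavy"), ("bollocks", "light"), ("hell", "light"),
  ("holy shit", "moderate"), ("horseshit", "moderate"),
  ("motherfucker", "heavy"), ("mother fucker", "heavy"),
  ("piss", "light"), ("pissed", "light"), ("shit", "moderate")]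

-- ===== PORT A =====
def pvSevMap : PySem.Dict String Int := PySem.Dict.ofList
  [("none", 0), ("light", 1), ("moderate", 2), ("heavy", 3)]

-- Python indexes severity_mapping[category] with []; the key is always present
-- (category is a dict value or the default "none"), so getD is exact here.
def pvStepA (highest word : String) : String :=
  let category := pvCatWords.getD word "none"
  if pvSevMap.getD category 0 > pvSevMap.getD highest 0 then category else highest

def determine_profanity_category (text : String) : String :=
  let words_in_text := PySem.Str.split₀ (PySem.Str.lower text)
  (PySem.List.slice words_in_text none (some (1000 : Int))).foldl pvStepA "none"

-- ===== PORT B =====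
def determine_profanity_category_alt (text : String) : String :=
  let words := PySem.List.slice (PySem.Str.split₀ (PySem.Str.lower text)) none (some (1000 : Int))
  -- 'for category in ("heavy","moderate","light"): if any(...): return category'
  if words.any (fun w => pvCatWords.get? w == some "heavy") then "heavy"
  else if words.any (fun w => pvCatWords.get? w == some "moderate") then "moderate"
  else if words.any (fun w => pvCatWords.get? w == some "light") then "light"
  else "none"

-- ===== PRECONDITION & SPEC =====
def Spec_determine_profanity_category (text : String) (out : String) : Prop := out = determine_profanity_category_alt text
instance (text : String) (out : String) : Decidable (Spec_determine_profanity_category text out) := by unfold Spec_determine_profanity_category; infer_instance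

-- ===== CLAIM (what is proved, stated in full; the proofs are below) =====
def Claim_equal_determine_profanity_category : Prop := ∀ (text : String), Dom_determine_profanity_category text → Spec_determine_profanity_category text (determine_profanity_category text)

-- ===== LEMMAS AND PROOFS =====

-- every value stored in the profanity dictionary is one of the three severities
lemma pvVals : ∀ p ∈ pvCatWords.items, p.2 = "light" ∨ p.2 = "moderate" ∨ p.2 = "heavy" := by decide

-- every dictionary lookup (with default "none") yields one of the four severity names
lemma pvCat_cases (w : String) :
    pvCatWords.getD w "none" = "none" ∨ pvCatWords.getD w "none" = "light" ∨
    pvCatWords.getD w "none" = "moderate" ∨ pvCatWords.getD w "none" = "heavy" := by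
  rcases hg : pvCatWords.get? w with _ | v
  · simp [PySem.Dict.getD_of_get?_eq_none pvCatWords "none" hg]
  · have hm := PySem.Dict.mem_items_of_get?_eq_some pvCatWords hg
    rw [PySem.Dict.getD_of_get?_eq_some pvCatWords "none" hg]
    have hv := pvVals _ hm
    tauto

-- a direct lookup matching category c (c ≠ "none") is the same test as the defaulted lookup
lemma pvGet_eq (w c : String) (hc : c ≠ "none") :
    (pvCatWords.get? w == some c) = (pvCatWords.getD w "none" == c) := by
  rcases hg : pvCatWords.get? w with _ | v
  · simp [PySem.Dict.getD_of_get?_eq_none pvCatWords "none" hg, Ne.symm hc]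
  · simp [PySem.Dict.getD_of_get?_eq_some pvCatWords "none" hg]

lemma pvSev_none : pvSevMap.getD "none" 0 = 0 := by decide
lemma pvSev_light : pvSevMap.getD "light" 0 = 1 := by decide
lemma pvSev_moderate : pvSevMap.getD "moderate" 0 = 2 := by decide
lemma pvSev_heavy : pvSevMap.getD "heavy" 0 = 3 := by decide

lemma pvLoop_eq (ws : List String) (h : String)
    (hh : h = "none" ∨ h = "light" ∨ h = "moderate" ∨ h = "heavy") :
    ws.foldl pvStepA h =
      if (ws.any fun w => pvCatWords.getD w "none" == "heavy") || (h == "heavy") then "heavy"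
      else if (ws.any fun w => pvCatWords.getD w "none" == "moderate") || (h == "moderate") then "moderate"
      else if (ws.any fun w => pvCatWords.getD w "none" == "light") || (h == "light") then "light"
      else "none" := by
  induction ws generalizing h with
  | nil => rcases hh with rfl | rfl | rfl | rfl <;> simp
  | cons w ws ih =>
    have i0 := ih "none" (by decide)
    have i1 := ih "light" (by decide)
    have i2 := ih "moderate" (by decide)
    have i3 := ih "heavy" (by decide)
    rcases pvCat_cases w with hc | hc | hc | hc <;>
      rcases hh with rfl | rfl | rfl | rfl <;>
        simp [List.foldl_cons, List.any_cons, pvStepA, hc,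
          pvSev_none, pvSev_light, pvSev_moderate, pvSev_heavy, i0, i1, i2, i3]

-- ===== VERDICT (by name: the statement is the Claim_ definition above) =====
theorem determine_profanity_category_spec : Claim_equal_determine_profanity_category := by
  intro text _
  unfold Spec_determine_profanity_category determine_profanity_category determine_profanity_category_alt
  rw [pvLoop_eq _ "none" (Or.inl rfl)]
  simp [pvGet_eq _ "heavy" (by decide), pvGet_eq _ "moderate" (by decide),
        pvGet_eq _ "light" (by decide)]
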